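-- pv_equiv track=rewrite | github.com/bentodd1/ncaab-dashboard | daily_picks/strategy_engine.py | get_team_conference_type
-- ===== SOURCE A (Python) =====
-- def get_team_conference_type(team_name, teams_db):
--     """
--     Look up team's conference type from database
--
--     Args:
--         team_name: Team name to lookup
--         teams_db: Dict mapping team names to conference types
--
--     Returns:
--         'Major', 'Mid-Major', 'Minor', or 'Unknown'
--     """
--     # Try exact match first
--     if team_name in teams_db:
--         return teams_db[team_name]
--
--     # Try case-insensitive match
--     team_lower = team_name.lower()
--     for db_team, conf_type in teams_db.items():
--         if db_team.lower() == team_lower: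
--             return conf_type
--
--     # Try partial match
--     for db_team, conf_type in teams_db.items():
--         if team_name in db_team or db_team in team_name:
--             return conf_type
--
--     return 'Unknown'
-- ===== SOURCE B (Python) =====
-- def get_team_conference_type(team_name, teams_db):
--     # Single pass over teams_db: track first case-insensitive and first partial match.
--     if team_name in teams_db:
--         return teams_db[team_name]
--     team_lower = team_name.lower()
--     ci = None
--     partial = None
--     for db_team, conf_type in teams_db.items():
--         if ci is None and db_team.lower() == team_lower:
--             ci = conf_type
--         if partial is None and (team_name in db_team or db_team in team_name):
--             partial = conf_type
--     if ci is not None: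
--         return ci
--     if partial is not None:
--         return partial
--     return 'Unknown'
-- ===== Notes on version B (the rewrite author's own statement) =====
-- stated objective: alternative
-- what changed: Replaces A's two successive scans of the dict (case-insensitive pass, then partial-match pass) with one single pass maintaining two set-once accumulators (first case-insensitive match, first partial match), resolved by priority after the loop.
import Mathlib
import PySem

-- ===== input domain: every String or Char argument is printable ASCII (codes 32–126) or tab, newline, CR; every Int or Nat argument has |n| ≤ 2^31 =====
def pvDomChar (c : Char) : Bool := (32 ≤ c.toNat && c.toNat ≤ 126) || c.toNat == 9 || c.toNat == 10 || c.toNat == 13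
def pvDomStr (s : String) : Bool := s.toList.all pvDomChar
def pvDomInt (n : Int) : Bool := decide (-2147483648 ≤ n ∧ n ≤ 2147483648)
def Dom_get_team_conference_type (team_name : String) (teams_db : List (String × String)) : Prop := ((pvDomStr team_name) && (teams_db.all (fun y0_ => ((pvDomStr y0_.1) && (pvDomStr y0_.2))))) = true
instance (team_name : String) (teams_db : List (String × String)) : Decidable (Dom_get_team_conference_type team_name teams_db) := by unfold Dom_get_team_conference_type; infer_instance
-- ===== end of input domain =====

-- B fuses A's two successive scans into one pass with two set-once accumulators (same results, alternative decomposition).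

-- ===== PORT A =====
-- A's second loop: first entry whose lowered key equals team_lower
def aCiLoop (team_lower : String) (items : List (String × String)) : Option String :=
  match items with
  | [] => none
  | (db_team, conf_type) :: rest =>
      if PySem.Str.lower db_team == team_lower then some conf_type
      else aCiLoop team_lower rest

-- A's third loop: first entry with a substring match either way
def aPartialLoop (team_name : String) (items : List (String × String)) : Option String :=
  match items with
  | [] => none
  | (db_team, conf_type) :: rest =>
      if PySem.Str.isIn team_name db_team || PySem.Str.isIn db_team team_name then some conf_type
      else aPartialLoop team_name rest

def get_team_conference_type (team_name : String) (teams_db : List (String × String)) : String :=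
  let d := PySem.Dict.ofList teams_db
  match d.get? team_name with
  | some v => v
  | none =>
    match aCiLoop (PySem.Str.lower team_name) d.items with
    | some v => v
    | none =>
      match aPartialLoop team_name d.items with
      | some v => v
      | none => "Unknown"

-- ===== PORT B =====
-- B's single loop: carry (ci, partial), each set only once
def bScan (team_lower team_name : String) (ci part : Option String)
    (items : List (String × String)) : Option String × Option String :=
  match items with
  | [] => (ci, part)
  | (db_team, conf_type) :: rest =>
      let ci' := if ci.isNone && (PySem.Str.lower db_team == team_lower) then some conf_type else ci
      let part' := if part.isNone && (PySem.Str.isIn team_name db_team || PySem.Str.isIn db_team team_name) then some conf_type else part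
      bScan team_lower team_name ci' part' rest

def get_team_conference_type_alt (team_name : String) (teams_db : List (String × String)) : String :=
  let d := PySem.Dict.ofList teams_db
  match d.get? team_name with
  | some v => v
  | none =>
    match bScan (PySem.Str.lower team_name) team_name none none d.items with
    | (some v, _) => v
    | (none, some v) => v
    | (none, none) => "Unknown"

-- ===== PRECONDITION & SPEC =====
def Spec_get_team_conference_type (team_name : String) (teams_db : List (String × String)) (out : String) : Prop := out = get_team_conference_type_alt team_name teams_db
instance (team_name : String) (teams_db : List (String × String)) (out : String) : Decidable (Spec_get_team_conference_type team_name teams_db out) := by unfold Spec_get_team_conference_type; infer_instance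

-- ===== CLAIM (what is proved, stated in full; the proofs are below) =====
def Claim_equal_get_team_conference_type : Prop := ∀ (team_name : String) (teams_db : List (String × String)), Dom_get_team_conference_type team_name teams_db → Spec_get_team_conference_type team_name teams_db (get_team_conference_type team_name teams_db)

-- ===== LEMMAS AND PROOFS =====
-- The fused scan with accumulators (ci, part) returns the accumulator if already set,
-- else the first match of the corresponding one of A's two loops.
theorem bScan_eq (team_lower team_name : String) (items : List (String × String)) :
    ∀ ci part : Option String, bScan team_lower team_name ci part items =
      ((ci.orElse fun _ => aCiLoop team_lower items),
       (part.orElse fun _ => aPartialLoop team_name items)) := by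
  induction items with
  | nil => intro ci part; cases ci <;> cases part <;> rfl
  | cons p rest ih =>
      intro ci part
      obtain ⟨db_team, conf_type⟩ := p
      cases ci <;> cases part <;>
        simp only [bScan, aCiLoop, aPartialLoop, Option.isNone, Bool.true_and,
          Bool.false_and, ih, Option.orElse] <;>
        split_ifs <;> simp_all

theorem get_team_conference_type_spec : Claim_equal_get_team_conference_type := by
  intro team_name teams_db _
  unfold Spec_get_team_conference_type get_team_conference_type get_team_conference_type_alt
  simp only []
  rw [bScan_eq]
  cases (PySem.Dict.ofList teams_db).get? team_name with
  | some v => rfl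
  | none =>
      simp only [Option.orElse]
      cases aCiLoop (PySem.Str.lower team_name) (PySem.Dict.ofList teams_db).items <;>
        cases aPartialLoop team_name (PySem.Dict.ofList teams_db).items <;> rfl
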